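-- pv_equiv track=rewrite | github.com/wzygxr/shuati | class026_BinarySearch/BinarySearchProblems.py | min_bullets
-- ===== SOURCE A (Python) =====
-- def min_bullets(points):
--     """
--     AtCoder ABC023D - 射撃王 (Shooting King)
--
--     时间复杂度: O(N^3 log N)
--     空间复杂度: O(N)
--
--     :param points: 目标点数组，每个点是(x, y)
--     :return: 最少需要的子弹数
--     """
--     n = len(points)
--     if n == 0:
--         return 0
--     if n == 1:
--         return 1
--
--     left, right = 1, n
--     while left < right:
--         mid = left + ((right - left) >> 1)
--         if can_cover(points, mid):
--             right = mid
--         else: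
--             left = mid + 1
--
--     return left
--
-- def can_cover(points, k):
--     """
--     辅助方法：判断是否可以用k条直线覆盖所有点
--     """
--     covered = [False] * len(points)
--     return cover_recursive(points, covered, 0, k)
--
-- def cover_recursive(points, covered, covered_count, remaining_lines):
--     """
--     递归辅助方法：尝试覆盖剩余的点
--     """
--     n = len(points)
--     if covered_count == n:
--         return True
--     if remaining_lines == 0:
--         return False
--
--     # 找到第一个未覆盖的点
--     first = -1
--     for i in range(n):
--         if not covered[i]:
--             first = i
--             break
--
--     # 尝试通过第一个未覆盖的点画一条直线
--     for i in range(n):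
--         if i == first or covered[i]:
--             continue
--
--         # 标记所有在这条直线上的点
--         new_covered = covered.copy()
--         new_count = covered_count
--
--         for j in range(n):
--             if not new_covered[j] and is_collinear(points[first], points[i], points[j]):
--                 new_covered[j] = True
--                 new_count += 1
--
--         if cover_recursive(points, new_covered, new_count, remaining_lines - 1):
--             return True
--
--     # 如果没有其他点，可以单独用一条直线覆盖第一个未覆盖的点
--     covered[first] = True
--     result = cover_recursive(points, covered, covered_count + 1, remaining_lines - 1)
--     covered[first] = False  # 回溯
--     return result
--
-- def is_collinear(p1, p2, p3):
--     """
--     辅助方法：判断三个点是否共线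
--     """
--     # 使用叉积判断三点共线
--     # (y2 - y1) * (x3 - x1) == (y3 - y1) * (x2 - x1)
--     return (p2[1] - p1[1]) * (p3[0] - p1[0]) == (p3[1] - p1[1]) * (p2[0] - p1[0])
-- ===== SOURCE B (Python) =====
-- def min_bullets(points):
--     """Minimum number of lines needed to cover all points: direct recursive minimization
--     over the set of still-uncovered points (no binary search, no feasibility oracle)."""
--     return _solve(list(points))
--
-- def _solve(remaining):
--     if not remaining:
--         return 0
--     p = remaining[0]
--     rest = remaining[1:]
--     best = 1 + _solve(rest)  # a line through p alone
--     for q in rest: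
--         best = min(best, 1 + _solve([r for r in rest if not _collinear(p, q, r)]))
--     return best
--
-- def _collinear(p1, p2, p3):
--     return (p2[1] - p1[1]) * (p3[0] - p1[0]) == (p3[1] - p1[1]) * (p2[0] - p1[0])
-- ===== Notes on version B (the rewrite author's own statement) =====
-- stated objective: simpler
-- what changed: Replaced the binary search over k with a boolean covered-array feasibility recursion by one direct recursion on the list of still-uncovered points that returns the minimum number of lines itself (fallback: cover the first point alone; branches: line through the first and each other remaining point, filtering out collinear points).
import Mathlib
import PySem

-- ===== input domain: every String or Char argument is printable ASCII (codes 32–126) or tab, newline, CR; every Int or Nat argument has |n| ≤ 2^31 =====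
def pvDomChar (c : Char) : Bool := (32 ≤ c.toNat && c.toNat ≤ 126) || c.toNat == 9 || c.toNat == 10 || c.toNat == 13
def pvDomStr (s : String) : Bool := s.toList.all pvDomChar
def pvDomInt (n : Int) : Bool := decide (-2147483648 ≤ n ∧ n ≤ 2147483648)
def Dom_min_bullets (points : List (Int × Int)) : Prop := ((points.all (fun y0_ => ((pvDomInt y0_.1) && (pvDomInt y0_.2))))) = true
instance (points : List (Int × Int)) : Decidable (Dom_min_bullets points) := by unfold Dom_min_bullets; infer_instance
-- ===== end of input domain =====

-- B replaces A's binary search over k plus a boolean feasibility recursion by one direct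
-- recursion on the list of still-uncovered points returning the minimum itself (simpler).

-- ===== PORT A =====
def is_collinear (p1 p2 p3 : Int × Int) : Bool :=
  (p2.2 - p1.2) * (p3.1 - p1.1) == (p3.2 - p1.2) * (p2.1 - p1.1)

-- remaining_lines is a Nat: Python only ever calls this with remaining_lines ≥ 0
-- (it starts at k ≥ 1 and the `remaining_lines == 0` guard stops before it goes negative).
def cover_recursive (points : List (Int × Int)) (covered : List Bool)
    (covered_count : Int) (remaining_lines : Nat) : Bool :=
  let n := points.length
  if covered_count == (n : Int) then true
  else
    match remaining_lines with
    | 0 => false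
    | r + 1 =>
      -- first = -1 is unreachable: every caller keeps covered_count = number of covered
      -- points, which is < n here, so some index is uncovered; `none => false` is never taken.
      match (List.range n).find? (fun i => !(covered.getD i true)) with
      | none => false
      | some first =>
        let tryPairs := (List.range n).any (fun i =>
          if i == first || covered.getD i true then false
          else
            let st := (List.range n).foldl
              (fun (st : List Bool × Int) j =>
                if !(st.1.getD j true) &&
                    is_collinear (points.getD first (0, 0)) (points.getD i (0, 0))
                      (points.getD j (0, 0))
                then (st.1.set j true, st.2 + 1) else st)
              (covered, covered_count)
            cover_recursive points st.1 st.2 r)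
        if tryPairs then true
        else cover_recursive points (covered.set first true) (covered_count + 1) r

-- k ≥ 1 at every call site, so k.toNat is Python's k exactly
def can_cover (points : List (Int × Int)) (k : Int) : Bool :=
  cover_recursive points (List.replicate points.length false) 0 k.toNat

-- the while-loop of min_bullets; (right-left) >> 1 on the nonnegative right-left is floor
-- division by 2.  fuel only bounds the number of iterations (fuel ≥ right-left at every
-- call, and the interval shrinks each round), so the fuel-0 branch is never the reason
-- the loop stops; it makes the recursion structural.
def bsearch_loop (points : List (Int × Int)) (fuel : Nat) (left right : Int) : Int :=
  match fuel with
  | 0 => left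
  | fuel + 1 =>
    if left < right then
      let mid := left + PySem.Int.floordiv (right - left) 2
      if can_cover points mid then bsearch_loop points fuel left mid
      else bsearch_loop points fuel (mid + 1) right
    else left

def min_bullets (points : List (Int × Int)) : Int :=
  let n := points.length
  if n == 0 then 0
  else if n == 1 then 1
  else bsearch_loop points n 1 (n : Int)

-- ===== PORT B =====
def collinear_alt (p1 p2 p3 : Int × Int) : Bool :=
  (p2.2 - p1.2) * (p3.1 - p1.1) == (p3.2 - p1.2) * (p2.1 - p1.1)

-- fuel bounds the recursion depth (every recursive call is on a strictly shorter list,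
-- and fuel ≥ length at every call, so the fuel-0 branch is never taken); it makes the
-- recursion structural.
def solveF : Nat → List (Int × Int) → Int
  | _, [] => 0
  | 0, _ :: _ => 0
  | fuel + 1, p :: rest =>
      rest.foldl
        (fun best q => min best (1 + solveF fuel (rest.filter (fun r => !collinear_alt p q r))))
        (1 + solveF fuel rest)

def solve_alt (l : List (Int × Int)) : Int :=
  solveF l.length l

def min_bullets_alt (points : List (Int × Int)) : Int :=
  solve_alt points

-- ===== PRECONDITION & SPEC =====
def Spec_min_bullets (points : List (Int × Int)) (out : Int) : Prop := out = min_bullets_alt points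
instance (points : List (Int × Int)) (out : Int) : Decidable (Spec_min_bullets points out) := by unfold Spec_min_bullets; infer_instance

-- ===== CLAIM (what is proved, stated in full; the proofs are below) =====
def Claim_equal_min_bullets : Prop := ∀ (points : List (Int × Int)), Dom_min_bullets points → Spec_min_bullets points (min_bullets points)

-- ===== LEMMAS AND PROOFS =====


def rem : List (Int × Int) → List Bool → List (Int × Int)
  | _, [] => []
  | [], _ => []
  | p :: ps, c :: cs => if c then rem ps cs else p :: rem ps cs

def firstFalse : List Bool → Option Nat
  | [] => none
  | c :: cs => if c then (firstFalse cs).map (· + 1) else some 0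

def stepSet (f : Nat → Bool) (st : List Bool × Int) (j : Nat) : List Bool × Int :=
  if !(st.1.getD j true) && f j then (st.1.set j true, st.2 + 1) else st

lemma rem_cons_true (p : Int × Int) (ps : List (Int × Int)) (cs : List Bool) :
    rem (p :: ps) (true :: cs) = rem ps cs := by simp [rem]

lemma rem_cons_false (p : Int × Int) (ps : List (Int × Int)) (cs : List Bool) :
    rem (p :: ps) (false :: cs) = p :: rem ps cs := by simp [rem]

lemma stepSet_pos (f : Nat → Bool) (cs : List Bool) (cc : Int) (j : Nat)
    (h : (!(cs.getD j true) && f j) = true) :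
    stepSet f (cs, cc) j = (cs.set j true, cc + 1) := by
  unfold stepSet
  rw [if_pos h]

lemma stepSet_neg (f : Nat → Bool) (cs : List Bool) (cc : Int) (j : Nat)
    (h : (!(cs.getD j true) && f j) = false) :
    stepSet f (cs, cc) j = (cs, cc) := by
  unfold stepSet
  rw [if_neg (by rw [h]; simp)]

lemma getD_set_ne (cs : List Bool) (i j : Nat) (a d : Bool) (h : i ≠ j) :
    (cs.set i a).getD j d = cs.getD j d := by
  simp [List.getD, List.getElem?_set_ne h]

lemma getD_set_self (cs : List Bool) (i : Nat) (a d : Bool) (h : i < cs.length) :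
    (cs.set i a).getD i d = a := by
  simp [List.getD, h]

lemma getD_false_lt (cs : List Bool) (j : Nat) (h : cs.getD j true = false) :
    j < cs.length := by
  by_contra hj
  rw [List.getD_eq_default] at h
  · exact Bool.false_ne_true h.symm
  · omega

lemma find_range_eq_firstFalse (cs : List Bool) :
    (List.range cs.length).find? (fun i => !(cs.getD i true)) = firstFalse cs := by
  induction cs with
  | nil => simp [firstFalse]
  | cons c cs ih =>
    rw [List.length_cons, List.range_succ_eq_map, List.find?_cons]
    cases c with
    | false => simp [firstFalse]
    | true =>
      have hc : (fun i => !((true :: cs).getD i true)) ∘ Nat.succ = (fun i => !(cs.getD i true)) := rfl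
      simp only [List.getD_cons_zero, Bool.not_true]
      rw [List.find?_map, hc, ih]
      simp [firstFalse]

lemma firstFalse_decomp (ps : List (Int × Int)) (cs : List Bool) (first : Nat)
    (hlen : ps.length = cs.length)
    (hfind : firstFalse cs = some first) :
    first < cs.length ∧ cs.getD first true = false ∧
      rem ps cs = ps.getD first (0, 0) :: rem ps (cs.set first true) := by
  induction ps generalizing cs first with
  | nil =>
    have : cs = [] := by cases cs with
      | nil => rfl
      | cons c cs => simp at hlen
    subst this; simp [firstFalse] at hfind
  | cons p ps ih =>
    cases cs with
    | nil => simp at hlen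
    | cons c cs =>
      cases c with
      | false =>
        have h0 : (0 : Nat) = first := by simpa [firstFalse] using hfind
        subst h0
        simp [rem_cons_false, rem_cons_true]
      | true =>
        have hfind' : (firstFalse cs).map (· + 1) = some first := by
          simpa [firstFalse] using hfind
        obtain ⟨f', hf', hq⟩ := Option.map_eq_some_iff.mp hfind'
        subst hq
        obtain ⟨h1, h2, h3⟩ := ih cs f' (by simpa using hlen) hf'
        refine ⟨by simpa using Nat.succ_lt_succ h1, by simpa using h2, ?_⟩
        rw [rem_cons_true, List.set_cons_succ, rem_cons_true, h3]
        rfl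

lemma exists_firstFalse (cs : List Bool) (h : cs.count true ≠ cs.length) :
    ∃ f, firstFalse cs = some f := by
  induction cs with
  | nil => simp at h
  | cons c cs ih =>
    cases c with
    | false => exact ⟨0, by simp [firstFalse]⟩
    | true =>
      have h' : cs.count true ≠ cs.length := by
        simp at h; omega
      obtain ⟨f, hf⟩ := ih h'
      exact ⟨f + 1, by simp [firstFalse, hf]⟩

lemma mem_rem (ps : List (Int × Int)) (cs : List Bool) (q : Int × Int)
    (hlen : ps.length = cs.length) :
    q ∈ rem ps cs ↔
      ∃ i, i < ps.length ∧ cs.getD i true = false ∧ ps.getD i (0, 0) = q := by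
  induction ps generalizing cs with
  | nil =>
    cases cs with
    | nil => simp [rem]
    | cons c cs => simp at hlen
  | cons p ps ih =>
    cases cs with
    | nil => simp at hlen
    | cons c cs =>
      have ih' := ih cs (by simpa using hlen)
      cases c with
      | true =>
        rw [rem_cons_true, ih']
        constructor
        · rintro ⟨i, h1, h2, h3⟩
          exact ⟨i + 1, by simpa using Nat.succ_lt_succ h1, by simpa using h2, by simpa using h3⟩
        · rintro ⟨i, h1, h2, h3⟩
          cases i with
          | zero => simp at h2
          | succ i => exact ⟨i, by simpa using h1, by simpa using h2, by simpa using h3⟩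
      | false =>
        rw [rem_cons_false, List.mem_cons, ih']
        constructor
        · rintro (rfl | ⟨i, h1, h2, h3⟩)
          · exact ⟨0, by simp, by simp, by simp⟩
          · exact ⟨i + 1, by simpa using Nat.succ_lt_succ h1, by simpa using h2, by simpa using h3⟩
        · rintro ⟨i, h1, h2, h3⟩
          cases i with
          | zero => exact Or.inl (by simpa using h3.symm)
          | succ i =>
            exact Or.inr ⟨i, by simpa using h1, by simpa using h2, by simpa using h3⟩

lemma count_set_true (cs : List Bool) (i : Nat) (hi : i < cs.length)
    (hf : cs.getD i true = false) :
    (cs.set i true).count true = cs.count true + 1 := by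
  induction cs generalizing i with
  | nil => simp at hi
  | cons c cs ih =>
    cases i with
    | zero =>
      simp only [List.getD_cons_zero] at hf
      subst hf
      simp
    | succ i =>
      simp only [List.getD_cons_succ] at hf
      simp only [List.set_cons_succ, List.count_cons]
      rw [ih i (by simpa using hi) hf]
      omega

lemma foldl_stepSet_length (f : Nat → Bool) (L : List Nat) (cs : List Bool) (cc : Int) :
    ((L.foldl (stepSet f) (cs, cc)).1).length = cs.length := by
  induction L generalizing cs cc with
  | nil => rfl
  | cons j L ih =>
    rw [List.foldl_cons]
    rcases Bool.eq_false_or_eq_true (!(cs.getD j true) && f j) with h | h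
    · rw [stepSet_pos f cs cc j h]
      rw [ih (cs.set j true) (cc + 1)]
      simp
    · rw [stepSet_neg f cs cc j h]; exact ih cs cc

lemma foldl_stepSet_count (f : Nat → Bool) (L : List Nat) (cs : List Bool) (cc : Int)
    (hcc : cc = (cs.count true : Int)) :
    (L.foldl (stepSet f) (cs, cc)).2 = (((L.foldl (stepSet f) (cs, cc)).1).count true : Int) := by
  induction L generalizing cs cc with
  | nil => simpa using hcc
  | cons j L ih =>
    rw [List.foldl_cons]
    rcases Bool.eq_false_or_eq_true (!(cs.getD j true) && f j) with h | h
    · rw [stepSet_pos f cs cc j h]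
      have hsp := h
      simp only [Bool.and_eq_true, Bool.not_eq_true'] at hsp
      obtain ⟨hgf, hfj⟩ := hsp
      have hj : j < cs.length := getD_false_lt cs j hgf
      exact ih (cs.set j true) (cc + 1)
        (by rw [count_set_true cs j hj hgf, hcc]; push_cast; ring)
    · rw [stepSet_neg f cs cc j h]; exact ih cs cc hcc

lemma foldl_stepSet_getD (f : Nat → Bool) (L : List Nat) (cs : List Bool) (cc : Int) (j : Nat) :
    ((L.foldl (stepSet f) (cs, cc)).1).getD j true
      = (cs.getD j true || (decide (j ∈ L) && f j)) := by
  induction L generalizing cs cc with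
  | nil => simp
  | cons i L ih =>
    rw [List.foldl_cons]
    rcases Bool.eq_false_or_eq_true (!(cs.getD i true) && f i) with h | h
    · have hsp := h
      simp only [Bool.and_eq_true, Bool.not_eq_true'] at hsp
      obtain ⟨hgf, hfi⟩ := hsp
      have hi : i < cs.length := getD_false_lt cs i hgf
      rw [stepSet_pos f cs cc i h, ih]
      by_cases hij : j = i
      · subst hij
        rw [getD_set_self cs j true true hi, hgf, hfi]
        simp
      · rw [getD_set_ne cs i j true true (fun hh => hij hh.symm)]
        have hmem : decide (j ∈ i :: L) = decide (j ∈ L) := by simp [List.mem_cons, hij]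
        rw [hmem]
    · rw [stepSet_neg f cs cc i h, ih]
      by_cases hij : j = i
      · subst hij
        rcases Bool.eq_false_or_eq_true (cs.getD j true) with hg | hg
        · rw [hg]; simp
        · have hfj : f j = false := by rw [hg] at h; simpa using h
          rw [hg, hfj]; simp
      · have hmem : decide (j ∈ i :: L) = decide (j ∈ L) := by simp [List.mem_cons, hij]
        rw [hmem]

lemma rem_replicate (ps : List (Int × Int)) :
    rem ps (List.replicate ps.length false) = ps := by
  induction ps with
  | nil => rfl
  | cons p ps ih => simp [rem, List.replicate, ih]

lemma rem_all_true (ps : List (Int × Int)) (cs : List Bool)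
    (hlen : ps.length = cs.length) (hcnt : cs.count true = cs.length) :
    rem ps cs = [] := by
  induction ps generalizing cs with
  | nil => cases cs <;> simp_all [rem]
  | cons p ps ih =>
    cases cs with
    | nil => simp at hlen
    | cons c cs =>
      have hle := List.count_le_length (l := cs) (a := true)
      cases c with
      | false => simp at hcnt; omega
      | true =>
        rw [rem_cons_true]
        exact ih cs (by simpa using hlen)
          (by simp at hcnt ⊢; omega)

lemma rem_or_filter (g : Int × Int → Bool) (ps : List (Int × Int)) (cs cs' : List Bool)
    (hlen : ps.length = cs.length) (hlen' : cs'.length = cs.length)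
    (hpt : ∀ j, j < cs.length → cs'.getD j true = (cs.getD j true || g (ps.getD j (0, 0)))) :
    rem ps cs' = (rem ps cs).filter (fun r => !g r) := by
  induction ps generalizing cs cs' with
  | nil =>
    cases cs with
    | nil =>
      cases cs' with
      | nil => rfl
      | cons c' cs' => simp at hlen'
    | cons c cs => simp at hlen
  | cons p ps ih =>
    cases cs with
    | nil => simp at hlen
    | cons c cs =>
      cases cs' with
      | nil => simp at hlen'
      | cons c' cs' =>
        have h0 : c' = (c || g p) := by simpa using hpt 0 (by simp)
        have hrec : rem ps cs' = (rem ps cs).filter (fun r => !g r) :=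
          ih cs cs' (by simpa using hlen) (by simpa using hlen')
            (fun j hj => by simpa using hpt (j + 1) (by simpa using Nat.succ_lt_succ hj))
        cases c with
        | true =>
          simp only [Bool.true_or] at h0
          subst h0
          rw [rem_cons_true, rem_cons_true, hrec]
        | false =>
          simp only [Bool.false_or] at h0
          subst h0
          rcases Bool.eq_false_or_eq_true (g p) with hg | hg
          · rw [hg, rem_cons_true, rem_cons_false, hrec, List.filter_cons]
            simp [hg]
          · rw [hg, rem_cons_false, rem_cons_false, hrec, List.filter_cons]
            simp [hg]

lemma foldl_min_le_iff (l : List (Int × Int)) (g : Int × Int → Int) (b x : Int) :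
    l.foldl (fun best q => min best (g q)) b ≤ x ↔ (b ≤ x ∨ ∃ q ∈ l, g q ≤ x) := by
  induction l generalizing b with
  | nil => simp
  | cons a l ih =>
    simp only [List.foldl_cons, ih, min_le_iff, List.mem_cons]
    constructor
    · rintro ((h | h) | ⟨q, hq, hgq⟩)
      · exact Or.inl h
      · exact Or.inr ⟨a, Or.inl rfl, h⟩
      · exact Or.inr ⟨q, Or.inr hq, hgq⟩
    · rintro (h | ⟨q, (rfl | hq), hgq⟩)
      · exact Or.inl (Or.inl h)
      · exact Or.inl (Or.inr hgq)
      · exact Or.inr ⟨q, hq, hgq⟩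

lemma solveF_congr : ∀ (fuel fuel' : Nat) (l : List (Int × Int)),
    l.length ≤ fuel → l.length ≤ fuel' → solveF fuel l = solveF fuel' l := by
  intro fuel
  induction fuel with
  | zero =>
    intro fuel' l hl hl'
    have : l = [] := List.length_eq_zero_iff.mp (by omega)
    subst this
    cases fuel' <;> rfl
  | succ fuel ih =>
    intro fuel' l hl hl'
    cases l with
    | nil => cases fuel' <;> rfl
    | cons p rest =>
      cases fuel' with
      | zero => simp at hl'
      | succ fuel' =>
        rw [solveF, solveF]
        have hrest : rest.length ≤ fuel := by simpa using hl
        have hrest' : rest.length ≤ fuel' := by simpa using hl'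
        have hfun : (fun (best : Int) q =>
              min best (1 + solveF fuel (rest.filter (fun r => !collinear_alt p q r))))
            = (fun (best : Int) q =>
              min best (1 + solveF fuel' (rest.filter (fun r => !collinear_alt p q r)))) := by
          funext best q
          rw [ih fuel' (rest.filter (fun r => !collinear_alt p q r))
            (le_trans (List.length_filter_le _ _) hrest)
            (le_trans (List.length_filter_le _ _) hrest')]
        rw [hfun, ih fuel' rest hrest hrest']

lemma solve_alt_cons (p : Int × Int) (rest : List (Int × Int)) :
    solve_alt (p :: rest)
      = rest.foldl
          (fun best q => min best (1 + solve_alt (rest.filter (fun r => !collinear_alt p q r))))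
          (1 + solve_alt rest) := by
  show solveF (p :: rest).length (p :: rest) = _
  rw [List.length_cons, solveF]
  have hfun : (fun (best : Int) q =>
        min best (1 + solveF rest.length (rest.filter (fun r => !collinear_alt p q r))))
      = (fun (best : Int) q =>
        min best (1 + solve_alt (rest.filter (fun r => !collinear_alt p q r)))) := by
    funext best q
    rw [show solve_alt (rest.filter (fun r => !collinear_alt p q r))
        = solveF (rest.filter (fun r => !collinear_alt p q r)).length
            (rest.filter (fun r => !collinear_alt p q r)) from rfl,
      solveF_congr rest.length _ _ (List.length_filter_le _ _) le_rfl]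
  rw [hfun]
  rfl

lemma solve_alt_nonneg_aux (N : Nat) :
    ∀ l : List (Int × Int), l.length ≤ N → 0 ≤ solve_alt l := by
  induction N with
  | zero =>
    intro l hl
    have : l = [] := List.length_eq_zero_iff.mp (by omega)
    subst this; simp [solve_alt, solveF]
  | succ N ih =>
    intro l hl
    cases l with
    | nil => simp [solve_alt, solveF]
    | cons p rest =>
      rw [solve_alt_cons]
      have hb : (0 : Int) ≤ 1 + solve_alt rest := by
        have := ih rest (by simpa using hl)
        omega
      by_contra hneg
      push Not at hneg
      have h1 : rest.foldl
          (fun best q => min best (1 + solve_alt (rest.filter (fun r => !collinear_alt p q r))))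
          (1 + solve_alt rest) ≤ -1 := by omega
      rcases (foldl_min_le_iff rest _ _ _).mp h1 with h | ⟨q, hq, hgq⟩
      · omega
      · have := ih (rest.filter (fun r => !collinear_alt p q r))
          (le_trans (List.length_filter_le _ _) (by simpa using hl))
        omega

lemma solve_alt_nonneg (l : List (Int × Int)) : 0 ≤ solve_alt l :=
  solve_alt_nonneg_aux l.length l le_rfl

lemma solve_alt_pos (p : Int × Int) (rest : List (Int × Int)) :
    1 ≤ solve_alt (p :: rest) := by
  rw [solve_alt_cons]
  by_contra hneg
  push Not at hneg
  have h1 : rest.foldl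
      (fun best q => min best (1 + solve_alt (rest.filter (fun r => !collinear_alt p q r))))
      (1 + solve_alt rest) ≤ 0 := by omega
  rcases (foldl_min_le_iff rest _ _ _).mp h1 with h | ⟨q, hq, hgq⟩
  · have := solve_alt_nonneg rest; omega
  · have := solve_alt_nonneg (rest.filter (fun r => !collinear_alt p q r)); omega

lemma solve_alt_le_length (l : List (Int × Int)) : solve_alt l ≤ (l.length : Int) := by
  induction l with
  | nil => simp [solve_alt, solveF]
  | cons p rest ih =>
    rw [solve_alt_cons]
    refine (foldl_min_le_iff rest _ _ _).mpr (Or.inl ?_)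
    simp only [List.length_cons]
    push_cast
    omega

lemma collinear_self (a b : Int × Int) : is_collinear a b a = true := by
  simp [is_collinear]

lemma if_eq_or (b c : Bool) : (if b then true else c) = (b || c) := by
  cases b <;> simp

lemma cover_done (points : List (Int × Int)) (covered : List Bool) (cc : Int) (r : Nat)
    (h : cc = ((points.length : Nat) : Int)) :
    cover_recursive points covered cc r = true := by
  rw [cover_recursive.eq_def]
  simp [h]

lemma cover_zero (points : List (Int × Int)) (covered : List Bool) (cc : Int)
    (h : cc ≠ ((points.length : Nat) : Int)) :
    cover_recursive points covered cc 0 = false := by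
  rw [cover_recursive.eq_def]
  simp [h]

lemma cover_succ (points : List (Int × Int)) (covered : List Bool) (cc : Int) (r : Nat)
    (h : cc ≠ ((points.length : Nat) : Int))
    (first : Nat)
    (hfind : (List.range points.length).find? (fun i => !(covered.getD i true)) = some first) :
    cover_recursive points covered cc (r + 1)
      = (((List.range points.length).any (fun i =>
            if i == first || covered.getD i true then false
            else
              cover_recursive points
                ((List.range points.length).foldl (stepSet (fun j =>
                    is_collinear (points.getD first (0, 0)) (points.getD i (0, 0))
                      (points.getD j (0, 0)))) (covered, cc)).1
                ((List.range points.length).foldl (stepSet (fun j =>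
                    is_collinear (points.getD first (0, 0)) (points.getD i (0, 0))
                      (points.getD j (0, 0)))) (covered, cc)).2
                r))
          || cover_recursive points (covered.set first true) (cc + 1) r) := by
  rw [cover_recursive.eq_def]
  have hbeq : (cc == ((points.length : Nat) : Int)) = false := by simp [h]
  simp only [hbeq, Bool.false_eq_true, if_false, hfind]
  rw [if_eq_or]
  rfl

lemma set_getD_false_iff (covered : List Bool) (first i : Nat)
    (hflt : first < covered.length) :
    ((covered.set first true).getD i true = false
      ↔ (i ≠ first ∧ covered.getD i true = false)) := by
  by_cases hif : i = first
  · subst hif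
    rw [getD_set_self covered i true true hflt]
    simp
  · rw [getD_set_ne covered first i true true (fun hh => hif hh.symm)]
    simp [hif]

lemma cover_iff (points : List (Int × Int)) :
    ∀ (r : Nat) (covered : List Bool) (cc : Int),
      covered.length = points.length → cc = (covered.count true : Int) →
      (cover_recursive points covered cc r = true ↔ solve_alt (rem points covered) ≤ (r : Int)) := by
  intro r
  induction r with
  | zero =>
    intro covered cc hlen hcc
    by_cases hcn : cc = ((points.length : Nat) : Int)
    · rw [cover_done points covered cc 0 hcn]
      have hcount : covered.count true = covered.length := by
        have h' : ((covered.count true : Nat) : Int) = ((covered.length : Nat) : Int) := by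
          rw [← hcc, hcn, hlen]
        exact_mod_cast h'
      rw [rem_all_true points covered hlen.symm hcount]
      simp [solve_alt, solveF]
    · rw [cover_zero points covered cc hcn]
      have hcount : covered.count true ≠ covered.length := by
        intro hh
        exact hcn (by rw [hcc, hh, hlen])
      obtain ⟨first, hfind⟩ := exists_firstFalse covered hcount
      obtain ⟨hflt, hfF, hdecomp⟩ := firstFalse_decomp points covered first hlen.symm hfind
      rw [hdecomp]
      simp only [Bool.false_eq_true, false_iff, not_le, Nat.cast_zero]
      have := solve_alt_pos (points.getD first (0, 0)) (rem points (covered.set first true))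
      omega
  | succ r ih =>
    intro covered cc hlen hcc
    by_cases hcn : cc = ((points.length : Nat) : Int)
    · rw [cover_done points covered cc (r + 1) hcn]
      have hcount : covered.count true = covered.length := by
        have h' : ((covered.count true : Nat) : Int) = ((covered.length : Nat) : Int) := by
          rw [← hcc, hcn, hlen]
        exact_mod_cast h'
      rw [rem_all_true points covered hlen.symm hcount]
      have hr1 : (0 : Int) ≤ ((r : Nat) : Int) + 1 := by omega
      simp [solve_alt, solveF, hr1]
    · have hcount : covered.count true ≠ covered.length := by
        intro hh
        exact hcn (by rw [hcc, hh, hlen])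
      obtain ⟨first, hfind0⟩ := exists_firstFalse covered hcount
      obtain ⟨hflt, hfF, hdecomp⟩ := firstFalse_decomp points covered first hlen.symm hfind0
      have hfind : (List.range points.length).find? (fun i => !(covered.getD i true)) = some first := by
        rw [← hlen, find_range_eq_firstFalse, hfind0]
      rw [cover_succ points covered cc r hcn first hfind]
      -- abbreviations
      have hlenset : (covered.set first true).length = points.length := by simpa using hlen
      have hccset : cc + 1 = ((covered.set first true).count true : Int) := by
        rw [count_set_true covered first hflt hfF, hcc]
        push_cast
        ring
      have hfb := ih (covered.set first true) (cc + 1) hlenset hccset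
      -- per-branch characterization
      have hbranch : ∀ i, i < points.length → i ≠ first → covered.getD i true = false →
          (cover_recursive points
              ((List.range points.length).foldl (stepSet (fun j =>
                  is_collinear (points.getD first (0, 0)) (points.getD i (0, 0))
                    (points.getD j (0, 0)))) (covered, cc)).1
              ((List.range points.length).foldl (stepSet (fun j =>
                  is_collinear (points.getD first (0, 0)) (points.getD i (0, 0))
                    (points.getD j (0, 0)))) (covered, cc)).2
              r = true
            ↔ solve_alt ((rem points (covered.set first true)).filter (fun rr =>
                !is_collinear (points.getD first (0, 0)) (points.getD i (0, 0)) rr)) ≤ (r : Int)) := by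
        intro i hin hine hiF
        set f : Nat → Bool := fun j =>
          is_collinear (points.getD first (0, 0)) (points.getD i (0, 0)) (points.getD j (0, 0)) with hf
        have hstlen : ((List.range points.length).foldl (stepSet f) (covered, cc)).1.length
            = points.length := by rw [foldl_stepSet_length]; exact hlen
        have hstcnt := foldl_stepSet_count f (List.range points.length) covered cc hcc
        have hrem : rem points ((List.range points.length).foldl (stepSet f) (covered, cc)).1
            = (rem points (covered.set first true)).filter (fun rr =>
                !is_collinear (points.getD first (0, 0)) (points.getD i (0, 0)) rr) := by
          apply rem_or_filter
            (fun pt => is_collinear (points.getD first (0, 0)) (points.getD i (0, 0)) pt)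
            points (covered.set first true)
          · rw [hlenset]
          · rw [hstlen, hlenset]
          · intro j hj
            rw [foldl_stepSet_getD]
            have hjlt : j < points.length := by rwa [hlenset] at hj
            have hjmem : decide (j ∈ List.range points.length) = true := by
              simp [List.mem_range, hjlt]
            rw [hjmem, Bool.true_and]
            by_cases hjf : j = first
            · subst hjf
              rw [getD_set_self covered j true true hflt, hfF, hf]
              simp [collinear_self]
            · rw [getD_set_ne covered first j true true (fun hh => hjf hh.symm)]
        rw [ih _ _ (by rw [hstlen]) hstcnt, hrem]
      -- the ∃-form of the any
      have hany_iff : ((List.range points.length).any (fun i =>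
            if i == first || covered.getD i true then false
            else
              cover_recursive points
                ((List.range points.length).foldl (stepSet (fun j =>
                    is_collinear (points.getD first (0, 0)) (points.getD i (0, 0))
                      (points.getD j (0, 0)))) (covered, cc)).1
                ((List.range points.length).foldl (stepSet (fun j =>
                    is_collinear (points.getD first (0, 0)) (points.getD i (0, 0))
                      (points.getD j (0, 0)))) (covered, cc)).2
                r) = true)
          ↔ (∃ q ∈ rem points (covered.set first true),
              solve_alt ((rem points (covered.set first true)).filter (fun rr =>
                !collinear_alt (points.getD first (0, 0)) q rr)) ≤ (r : Int)) := by
        rw [List.any_eq_true]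
        constructor
        · rintro ⟨i, hi, hbody⟩
          rw [List.mem_range] at hi
          rcases Bool.eq_false_or_eq_true (i == first || covered.getD i true) with hcond | hcond
          · rw [hcond] at hbody
            simp at hbody
          · rw [hcond, if_neg (by simp)] at hbody
            have hcond' := hcond
            simp only [Bool.or_eq_false_iff, beq_eq_false_iff_ne] at hcond'
            obtain ⟨hine, hiF⟩ := hcond'
            refine ⟨points.getD i (0, 0), ?_, ?_⟩
            · rw [mem_rem points (covered.set first true) _ (by rw [hlenset])]
              exact ⟨i, hi, (set_getD_false_iff covered first i hflt).mpr ⟨hine, hiF⟩, rfl⟩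
            · exact (hbranch i hi hine hiF).mp hbody
        · rintro ⟨q, hq, hsol⟩
          rw [mem_rem points (covered.set first true) _ (by rw [hlenset])] at hq
          obtain ⟨i, hi, hgF, hgq⟩ := hq
          obtain ⟨hine, hiF⟩ := (set_getD_false_iff covered first i hflt).mp hgF
          refine ⟨i, by rw [List.mem_range]; exact hi, ?_⟩
          have hcondF : (i == first || covered.getD i true) = false := by
            rw [Bool.or_eq_false_iff]
            exact ⟨by simp [hine], hiF⟩
          rw [hcondF, if_neg (by simp)]
          apply (hbranch i hi hine hiF).mpr
          rw [hgq]
          exact hsol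
      -- assemble
      rw [Bool.or_eq_true, hany_iff, hfb, hdecomp, solve_alt_cons]
      rw [foldl_min_le_iff]
      have hc1 : (1 : Int) + solve_alt (rem points (covered.set first true)) ≤ ((r + 1 : Nat) : Int)
          ↔ solve_alt (rem points (covered.set first true)) ≤ (r : Int) := by
        push_cast
        omega
      constructor
      · rintro (⟨q, hq, hs⟩ | hfb')
        · exact Or.inr ⟨q, hq, by push_cast; omega⟩
        · exact Or.inl (hc1.mpr hfb')
      · rintro (hb | ⟨q, hq, hs⟩)
        · exact Or.inr (hc1.mp hb)
        · exact Or.inl ⟨q, hq, by push_cast at hs ⊢; omega⟩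

lemma can_cover_iff (points : List (Int × Int)) (k : Int) (hk : 0 ≤ k) :
    (can_cover points k = true ↔ solve_alt points ≤ k) := by
  unfold can_cover
  have h := cover_iff points k.toNat (List.replicate points.length false) 0
    (by simp) (by simp [List.count_replicate])
  rw [rem_replicate] at h
  rwa [Int.toNat_of_nonneg hk] at h

lemma bsearch_eq (points : List (Int × Int)) (m : Int) (hm : m = solve_alt points) :
    ∀ (fuel : Nat) (l rt : Int), (rt - l).toNat ≤ fuel → 0 ≤ l → l ≤ m → m ≤ rt →
      bsearch_loop points fuel l rt = m := by
  intro fuel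
  induction fuel with
  | zero =>
    intro l rt hN h0 hlm hmr
    show l = m
    omega
  | succ fuel ih =>
    intro l rt hN h0 hlm hmr
    rw [bsearch_loop]
    by_cases hlr : l < rt
    · rw [if_pos hlr]
      have hfd : PySem.Int.floordiv (rt - l) 2 = (rt - l) / 2 :=
        PySem.Int.floordiv_eq_ediv_of_pos (by omega)
      have hcc := can_cover_iff points (l + PySem.Int.floordiv (rt - l) 2) (by rw [hfd]; omega)
      rw [← hm] at hcc
      cases hc : can_cover points (l + PySem.Int.floordiv (rt - l) 2) with
      | true =>
        rw [if_pos hc]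
        have hle : m ≤ l + PySem.Int.floordiv (rt - l) 2 := hcc.mp hc
        exact ih l _ (by rw [hfd] at *; omega) h0 hlm hle
      | false =>
        rw [if_neg (by rw [hc]; simp)]
        have hgt : ¬ m ≤ l + PySem.Int.floordiv (rt - l) 2 := fun h => by
          rw [hcc.mpr h] at hc
          simp at hc
        exact ih _ rt (by rw [hfd] at *; omega) (by rw [hfd] at *; omega)
          (by rw [hfd] at *; omega) hmr
    · rw [if_neg hlr]
      omega

-- ===== VERDICT (by name: the statement is the Claim_ definition above) =====
theorem min_bullets_spec : Claim_equal_min_bullets := by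
  intro points _
  unfold Spec_min_bullets min_bullets min_bullets_alt
  cases points with
  | nil => simp [solve_alt, solveF]
  | cons p rest =>
    cases rest with
    | nil => simp [solve_alt, solveF]
    | cons p2 rest2 =>
      simp only [List.length_cons]
      rw [if_neg (by simp), if_neg (by simp)]
      exact bsearch_eq (p :: p2 :: rest2) _ rfl _ 1 _ (by omega) (by omega)
        (by simpa using solve_alt_pos p (p2 :: rest2))
        (by simpa using solve_alt_le_length (p :: p2 :: rest2))
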